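-- pv_equiv track=rewrite | github.com/xkennawb/golf-handicap-calculator | handicap.py | calculate_adjusted_gross_score
-- ===== SOURCE A (Python) =====
-- def calculate_adjusted_gross_score(holes, pars, course_handicap, hole_handicaps):
--     """
--     Calculate adjusted gross score with net double bogey (ESC) applied per hole.
--
--     Args:
--         holes: List of scores for each hole (None = X mark/blob)
--         pars: List of par values for each hole
--         course_handicap: Player's course handicap for the round
--         hole_handicaps: List of hole handicap indexes (1-18, where 1 is hardest)
--
--     Returns:
--         Adjusted gross score with net double bogey applied
--     """
--     # Determine which holes get strokes
--     # Holes are allocated strokes in order of their handicap index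
--     strokes_per_hole = [0] * len(holes)
--
--     # Sort holes by handicap index to allocate strokes
--     sorted_holes = sorted(enumerate(hole_handicaps), key=lambda x: x[1])
--
--     strokes_remaining = course_handicap
--     while strokes_remaining > 0:
--         for hole_idx, _ in sorted_holes:
--             if strokes_remaining > 0:
--                 strokes_per_hole[hole_idx] += 1
--                 strokes_remaining -= 1
--             else:
--                 break
--
--     adjusted_total = 0
--     for i, (score, par) in enumerate(zip(holes, pars)):
--         # Calculate max allowable (net double bogey)
--         max_score = par + 2 + strokes_per_hole[i]
--
--         # If score is None (X mark/blob), use max allowable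
--         if score is None:
--             actual_score = max_score
--         else:
--             actual_score = score
--
--         # Apply net double bogey cap
--         adjusted_score = min(actual_score, max_score)
--         adjusted_total += adjusted_score
--
--     return adjusted_total
-- ===== SOURCE B (Python) =====
-- def calculate_adjusted_gross_score(holes, pars, course_handicap, hole_handicaps):
--     """Net double bogey adjustment; strokes allocated arithmetically via divmod
--     (each hole gets ch//n, the first ch%n holes in handicap order get one more)
--     instead of repeated one-stroke passes."""
--     n = len(hole_handicaps)
--     order = [i for i, _ in sorted(enumerate(hole_handicaps), key=lambda x: x[1])]
--     strokes = [0] * len(holes)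
--     if course_handicap > 0 and n > 0:
--         q, r = divmod(course_handicap, n)
--         for rank, i in enumerate(order):
--             strokes[i] = q + (1 if rank < r else 0)
--     total = 0
--     for score, par, st in zip(holes, pars, strokes):
--         m = par + 2 + st
--         total += m if score is None else min(score, m)
--     return total
-- ===== Notes on version B (the rewrite author's own statement) =====
-- stated objective: alternative
-- what changed: The stroke allocation replaces A's repeated one-stroke passes over the sorted holes (course_handicap iterations in total) by a single divmod: every hole gets course_handicap//n strokes and the first course_handicap%n holes in handicap order get one more.
-- outside the precondition, e.g. on calculate_adjusted_gross_score([None], [3], 1, [1, 2]): A returns 6, B raises IndexError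
import Mathlib
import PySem

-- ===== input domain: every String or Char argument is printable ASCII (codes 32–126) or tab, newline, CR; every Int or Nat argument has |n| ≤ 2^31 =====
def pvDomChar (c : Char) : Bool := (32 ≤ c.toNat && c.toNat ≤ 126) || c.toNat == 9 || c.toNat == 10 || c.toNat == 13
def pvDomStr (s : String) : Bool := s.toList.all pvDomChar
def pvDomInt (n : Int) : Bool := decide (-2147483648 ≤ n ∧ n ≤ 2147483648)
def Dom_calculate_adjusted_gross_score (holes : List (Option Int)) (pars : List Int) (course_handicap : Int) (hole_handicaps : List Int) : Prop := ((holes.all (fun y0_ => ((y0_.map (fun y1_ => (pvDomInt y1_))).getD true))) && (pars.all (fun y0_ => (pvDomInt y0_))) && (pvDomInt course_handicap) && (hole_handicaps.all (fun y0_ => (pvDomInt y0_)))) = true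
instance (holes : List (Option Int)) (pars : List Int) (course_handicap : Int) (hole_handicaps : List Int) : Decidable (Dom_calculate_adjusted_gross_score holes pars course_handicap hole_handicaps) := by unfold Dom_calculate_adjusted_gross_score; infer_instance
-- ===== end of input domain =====

-- B replaces A's repeated one-stroke allocation passes over the sorted holes by a single divmod
-- allocation (each hole gets ch//n strokes, the first ch%n holes in handicap order one more);
-- objective: alternative.

-- ===== PORT A =====
-- one step of the inner 'for hole_idx, _ in sorted_holes' body (the 'break' only cuts no-op iterations)
def pvStepA (st : List Int × Int) (i : Int) : List Int × Int :=
  if st.2 > 0 then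
    (PySem.List.pySetD st.1 i (PySem.List.pyGetD st.1 i 0 + 1), st.2 - 1)
  else st

-- termination fact for the while loop, cited by decreasing_by
theorem pvFoldStepA_snd_le (l : List (Int × Int)) : ∀ st : List Int × Int,
    (l.foldl (fun s p => pvStepA s p.1) st).2 ≤ st.2 := by
  induction l with
  | nil => intro st; simp
  | cons p rest ih =>
    intro st
    simp only [List.foldl_cons]
    refine le_trans (ih _) ?_
    unfold pvStepA; split <;> omega

-- one whole run of the inner for-loop
def pvPassA (sortedH : List (Int × Int)) (st : List Int × Int) : List Int × Int :=
  sortedH.foldl (fun s p => pvStepA s p.1) st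

-- 'while strokes_remaining > 0: for hole_idx, _ in sorted_holes: …'
-- (on sorted_holes = [] with rem > 0 the Python loops forever; Pre_ excludes that, the guard only makes the definition total)
def pvWhileA (sortedH : List (Int × Int)) (sph : List Int) (rem : Int) : List Int :=
  if h : 0 < rem then
    if hn : sortedH = [] then sph
    else
      let st := pvPassA sortedH (sph, rem)
      pvWhileA sortedH st.1 st.2
  else sph
termination_by rem.toNat
decreasing_by
  obtain ⟨p, rest, rfl⟩ := List.exists_cons_of_ne_nil hn
  have h2 := pvFoldStepA_snd_le rest (pvStepA (sph, rem) p.1)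
  have h3 : (pvStepA (sph, rem) p.1).2 = rem - 1 := by unfold pvStepA; simp [h]
  show (pvPassA (p :: rest) (sph, rem)).2.toNat < rem.toNat
  rw [pvPassA, List.foldl_cons]
  omega

def calculate_adjusted_gross_score (holes : List (Option Int)) (pars : List Int) (course_handicap : Int) (hole_handicaps : List Int) : Int :=
  let sortedHoles := PySem.List.sorted (PySem.List.enumerate hole_handicaps) (fun p => p.2) false
  let strokes := pvWhileA sortedHoles (List.replicate holes.length (0 : Int)) course_handicap
  (PySem.List.enumerate (holes.zip pars)).foldl
    (fun acc q =>
      let maxScore := q.2.2 + 2 + PySem.List.pyGetD strokes q.1 0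
      let actual := match q.2.1 with | none => maxScore | some s => s
      acc + min actual maxScore) 0

-- ===== PORT B =====
def calculate_adjusted_gross_score_alt (holes : List (Option Int)) (pars : List Int) (course_handicap : Int) (hole_handicaps : List Int) : Int :=
  let n : Int := hole_handicaps.length
  let order := (PySem.List.sorted (PySem.List.enumerate hole_handicaps) (fun p => p.2) false).map Prod.fst
  let strokes0 := List.replicate holes.length (0 : Int)
  let strokes :=
    if 0 < course_handicap ∧ 0 < n then
      let q := PySem.Int.floordiv course_handicap n
      let r := PySem.Int.mod course_handicap n
      (PySem.List.enumerate order).foldl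
        (fun st p => PySem.List.pySetD st p.2 (q + if p.1 < r then 1 else 0)) strokes0
    else strokes0
  ((holes.zip pars).zip strokes).foldl
    (fun acc q =>
      acc + match q.1.1 with
            | none => q.1.2 + 2 + q.2
            | some sc => min sc (q.1.2 + 2 + q.2)) 0

-- ===== PRECONDITION & SPEC =====
-- Pre_ excludes course_handicap > 0 with empty hole_handicaps (A loops forever) and with more
-- hole_handicaps than holes (A raises IndexError when an out-of-range hole index is reached, or
-- returns only accidentally when the strokes run out before reaching it; B raises IndexError there).
def Pre_calculate_adjusted_gross_score (holes : List (Option Int)) (pars : List Int) (course_handicap : Int) (hole_handicaps : List Int) : Prop :=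
  0 < course_handicap → (hole_handicaps ≠ [] ∧ hole_handicaps.length ≤ holes.length)
instance (holes : List (Option Int)) (pars : List Int) (course_handicap : Int) (hole_handicaps : List Int) : Decidable (Pre_calculate_adjusted_gross_score holes pars course_handicap hole_handicaps) := by unfold Pre_calculate_adjusted_gross_score; infer_instance

def pvWitness_calculate_adjusted_gross_score : List (Option Int) × List Int × Int × List Int :=
  ([some 4, none], [3, 4], 2, [2, 1])

def Spec_calculate_adjusted_gross_score (holes : List (Option Int)) (pars : List Int) (course_handicap : Int) (hole_handicaps : List Int) (out : Int) : Prop := out = calculate_adjusted_gross_score_alt holes pars course_handicap hole_handicaps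
instance (holes : List (Option Int)) (pars : List Int) (course_handicap : Int) (hole_handicaps : List Int) (out : Int) : Decidable (Spec_calculate_adjusted_gross_score holes pars course_handicap hole_handicaps out) := by unfold Spec_calculate_adjusted_gross_score; infer_instance

-- ===== CLAIM (what is proved, stated in full; the proofs are below) =====
def Claim_equal_calculate_adjusted_gross_score : Prop := ∀ (holes : List (Option Int)) (pars : List Int) (course_handicap : Int) (hole_handicaps : List Int), Dom_calculate_adjusted_gross_score holes pars course_handicap hole_handicaps → Pre_calculate_adjusted_gross_score holes pars course_handicap hole_handicaps → Spec_calculate_adjusted_gross_score holes pars course_handicap hole_handicaps (calculate_adjusted_gross_score holes pars course_handicap hole_handicaps)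

-- ===== LEMMAS AND PROOFS =====

theorem pvGetD_out {α : Type} (xs : List α) {j : Int} (d : α) (h0 : 0 ≤ j)
    (h : (xs.length : Int) ≤ j) : PySem.List.pyGetD xs j d = d := by
  have hj : j = ((j.toNat : Nat) : Int) := by omega
  rw [hj, PySem.List.pyGetD_natCast]
  exact List.getD_eq_default _ _ (by omega)

theorem pvGetD_setD {α : Type} (xs : List α) {i j : Int} (v : α) (d : α)
    (hi0 : 0 ≤ i) (hilen : i < (xs.length : Int)) (hj0 : 0 ≤ j) :
    PySem.List.pyGetD (PySem.List.pySetD xs i v) j d =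
      if j = i then v else PySem.List.pyGetD xs j d := by
  rw [PySem.List.pySetD_of_nonneg xs v hi0]
  by_cases hjl : j < (xs.length : Int)
  · rw [PySem.List.pyGetD_eq_getElem _ d hj0 (by simpa using hjl),
        PySem.List.pyGetD_eq_getElem _ d hj0 hjl, List.getElem_set]
    by_cases hji : j = i
    · rw [if_pos (by omega), if_pos hji]
    · rw [if_neg (by omega), if_neg hji]
  · rw [pvGetD_out _ d hj0 (by simpa using (by omega : (xs.length:Int) ≤ j)),
        pvGetD_out xs d hj0 (by omega), if_neg (by omega)]

theorem pvGetD_replicate (L : Nat) {j : Int} (hj : 0 ≤ j) :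
    PySem.List.pyGetD (List.replicate L (0:Int)) j 0 = 0 := by
  by_cases h : j < (L : Int)
  · rw [PySem.List.pyGetD_eq_getElem _ _ hj (by simpa using h)]; simp
  · exact pvGetD_out _ _ hj (by simpa using (by omega : (L:Int) ≤ j))

-- one pass of A's inner for-loop: the first min(rem, |l|) holes in l get one stroke
theorem pvFoldStepA_spec (l : List Int) : ∀ (base : List Int) (rem : Int), 0 ≤ rem →
    l.Nodup → (∀ i ∈ l, 0 ≤ i ∧ i < (base.length : Int)) →
    (l.foldl pvStepA (base, rem)).2 = rem - min rem l.length ∧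
    (l.foldl pvStepA (base, rem)).1.length = base.length ∧
    ∀ j : Int, 0 ≤ j →
      PySem.List.pyGetD (l.foldl pvStepA (base, rem)).1 j 0 =
        PySem.List.pyGetD base j 0 + (if j ∈ l ∧ (l.idxOf j : Int) < rem then 1 else 0) := by
  induction l with
  | nil =>
    intro base rem h0 _ _
    refine ⟨?_, rfl, ?_⟩
    · simp only [List.foldl_nil, List.length_nil, Nat.cast_zero]; omega
    · intro j _; simp
  | cons i rest ih =>
    intro base rem h0 hnd hbnd
    obtain ⟨hni, hnd'⟩ := List.nodup_cons.mp hnd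
    obtain ⟨hi0, hilen⟩ := hbnd i (List.mem_cons_self ..)
    by_cases hr : 0 < rem
    · have hstep : pvStepA (base, rem) i =
        (PySem.List.pySetD base i (PySem.List.pyGetD base i 0 + 1), rem - 1) := by
        simp [pvStepA, hr]
      rw [List.foldl_cons, hstep]
      set base' := PySem.List.pySetD base i (PySem.List.pyGetD base i 0 + 1) with hbase'
      have hlen' : base'.length = base.length := PySem.List.length_pySetD ..
      have hbnd' : ∀ k ∈ rest, 0 ≤ k ∧ k < (base'.length : Int) := by
        intro k hk; rw [hlen']; exact hbnd k (List.mem_cons_of_mem _ hk)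
      obtain ⟨hsnd, hlen2, hget⟩ := ih base' (rem - 1) (by omega) hnd' hbnd'
      refine ⟨?_, by rw [hlen2, hlen'], ?_⟩
      · rw [hsnd]; simp only [List.length_cons]; push_cast; omega
      intro j hj0
      rw [hget j hj0, hbase', pvGetD_setD base _ 0 hi0 hilen hj0]
      by_cases hji : j = i
      · subst hji
        rw [if_pos rfl, if_neg (fun h => hni h.1),
            if_pos ⟨List.mem_cons_self .., by rw [List.idxOf_cons_self]; exact_mod_cast hr⟩]
        ring
      · rw [if_neg hji]
        have hidx : (i :: rest).idxOf j = rest.idxOf j + 1 := by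
          simp [Ne.symm hji]
        by_cases hjm : j ∈ rest
        · have hmc : j ∈ i :: rest := List.mem_cons_of_mem _ hjm
          have hiff : (j ∈ rest ∧ (rest.idxOf j : Int) < rem - 1) ↔
              (j ∈ i :: rest ∧ (((i :: rest).idxOf j : Nat) : Int) < rem) := by
            simp only [hidx, hjm, hmc, true_and]; push_cast; omega
          rw [if_congr hiff rfl rfl]
        · rw [if_neg (fun h => hjm h.1), if_neg ?_]
          intro ⟨hm, _⟩
          rcases List.mem_cons.mp hm with h | h
          · exact hji h
          · exact hjm h
    · have hrem : rem = 0 := by omega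
      subst hrem
      have hstep : pvStepA (base, 0) i = (base, 0) := by simp [pvStepA]
      rw [List.foldl_cons, hstep]
      obtain ⟨hsnd, hlen2, hget⟩ := ih base 0 le_rfl hnd' (fun k hk => hbnd k (List.mem_cons_of_mem _ hk))
      refine ⟨by rw [hsnd]; simp only [List.length_cons]; push_cast; omega, hlen2, ?_⟩
      intro j hj0
      rw [hget j hj0]
      have c1 : ¬ (j ∈ rest ∧ (rest.idxOf j : Int) < 0) := by intro ⟨_, h⟩; omega
      have c2 : ¬ (j ∈ i :: rest ∧ ((i :: rest).idxOf j : Int) < 0) := by intro ⟨_, h⟩; omega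
      rw [if_neg c1, if_neg c2]

-- allocating by passes, then arithmetically for what remains, is allocating arithmetically
theorem pvAllocStep (n t rem : Int) (hn : 1 ≤ n) (ht0 : 0 ≤ t) (htn : t < n) (hr : 0 < rem) :
    (if t < rem then (1:Int) else 0) +
      ((rem - min rem n) / n + (if t < (rem - min rem n) % n then 1 else 0))
    = rem / n + (if t < rem % n then 1 else 0) := by
  by_cases h : n ≤ rem
  · have hmin : min rem n = n := by omega
    have hdiv : (rem - n) / n = rem / n - 1 := by
      have h2 := Int.add_mul_ediv_right (rem - n) 1 (by omega : n ≠ 0)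
      rw [one_mul, sub_add_cancel] at h2
      omega
    rw [hmin, hdiv, Int.sub_emod_right, if_pos (by omega : t < rem)]
    ring
  · replace h : rem < n := by omega
    have hmin : min rem n = rem := by omega
    rw [hmin, sub_self, Int.zero_ediv, Int.zero_emod,
        Int.ediv_eq_zero_of_lt (by omega) h, Int.emod_eq_of_lt (by omega) h,
        if_neg (by omega : ¬ t < 0)]
    ring

-- A's while loop, characterised pointwise: the hole of rank t gets s/n + (1 if t < s%n), s = max rem 0
theorem pvWhileA_spec (sortedH : List (Int × Int)) (l : List Int)
    (hl : l = sortedH.map Prod.fst) (hne : l ≠ []) (hnd : l.Nodup) :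
    ∀ (rem : Int) (base : List Int), (∀ i ∈ l, 0 ≤ i ∧ i < (base.length : Int)) →
    (pvWhileA sortedH base rem).length = base.length ∧
    ∀ j : Int, 0 ≤ j →
      PySem.List.pyGetD (pvWhileA sortedH base rem) j 0 =
        PySem.List.pyGetD base j 0 +
        (if j ∈ l then (max rem 0) / (l.length : Int) +
            (if (l.idxOf j : Int) < (max rem 0) % (l.length : Int) then 1 else 0)
         else 0) := by
  intro rem base hbnd
  have hsne : sortedH ≠ [] := by intro h; apply hne; rw [hl, h]; rfl
  have hn1 : 1 ≤ l.length := List.length_pos_iff.mpr hne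
  induction hk : rem.toNat using Nat.strong_induction_on generalizing rem base with
  | _ k IH =>
  rw [pvWhileA]
  by_cases hr : 0 < rem
  · rw [dif_pos hr, dif_neg hsne]
    have hfold : pvPassA sortedH (base, rem) = l.foldl pvStepA (base, rem) := by
      rw [pvPassA, hl, List.foldl_map]
    obtain ⟨hsnd, hlen1, hget1⟩ := pvFoldStepA_spec l base rem (by omega) hnd hbnd
    simp only [hfold, hsnd]
    set rem' := rem - min rem (l.length : Int) with hrem'
    have hrge : 0 ≤ rem' := by omega
    have hdec : rem'.toNat < k := by omega
    obtain ⟨hlen2, hget2⟩ := IH rem'.toNat hdec rem' (l.foldl pvStepA (base, rem)).1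
      (by rw [hlen1]; exact hbnd) rfl
    refine ⟨by rw [hlen2, hlen1], ?_⟩
    intro j hj0
    rw [hget2 j hj0, hget1 j hj0]
    rw [max_eq_left hrge, max_eq_left (by omega : (0:Int) ≤ rem)]
    by_cases hjm : j ∈ l
    · rw [if_pos hjm, if_pos hjm]
      have ht := List.idxOf_lt_length_of_mem hjm
      have harith := pvAllocStep (l.length : Int) (l.idxOf j : Int) rem (by exact_mod_cast hn1)
        (by positivity) (by exact_mod_cast ht) hr
      rw [← hrem'] at harith
      rw [if_congr (and_iff_right hjm) rfl rfl]
      linarith [harith]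
    · rw [if_neg hjm, if_neg hjm, if_neg (fun h => hjm h.1)]
      ring
  · rw [dif_neg hr]
    refine ⟨rfl, ?_⟩
    intro j hj0
    have hmax : max rem 0 = 0 := by omega
    rw [hmax]
    by_cases hjm : j ∈ l
    · rw [if_pos hjm]
      rw [Int.zero_ediv, Int.zero_emod, if_neg (by omega : ¬ ((l.idxOf j : Int) < 0))]
      ring
    · rw [if_neg hjm]; ring

-- B's allocation fold, characterised pointwise
theorem pvFoldB_spec (q r : Int) (l : List Int) : ∀ (base : List Int) (start : Int), 0 ≤ start →
    l.Nodup → (∀ i ∈ l, 0 ≤ i ∧ i < (base.length : Int)) →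
    ((PySem.List.enumerate l start).foldl
        (fun st p => PySem.List.pySetD st p.2 (q + if p.1 < r then 1 else 0)) base).length = base.length ∧
    ∀ j : Int, 0 ≤ j →
      PySem.List.pyGetD ((PySem.List.enumerate l start).foldl
          (fun st p => PySem.List.pySetD st p.2 (q + if p.1 < r then 1 else 0)) base) j 0 =
        if j ∈ l then q + (if start + (l.idxOf j : Int) < r then 1 else 0)
        else PySem.List.pyGetD base j 0 := by
  induction l with
  | nil =>
    intro base start _ _ _
    refine ⟨rfl, ?_⟩
    intro j _; simp [PySem.List.enumerate]
  | cons i rest ih =>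
    intro base start hs0 hnd hbnd
    obtain ⟨hni, hnd'⟩ := List.nodup_cons.mp hnd
    obtain ⟨hi0, hilen⟩ := hbnd i (List.mem_cons_self ..)
    rw [PySem.List.enumerate_cons, List.foldl_cons]
    set base' := PySem.List.pySetD base i (q + if start < r then 1 else 0) with hbase'
    have hlen' : base'.length = base.length := PySem.List.length_pySetD ..
    obtain ⟨hlen2, hget⟩ := ih base' (start + 1) (by omega) hnd'
      (fun k hk => by rw [hlen']; exact hbnd k (List.mem_cons_of_mem _ hk))
    refine ⟨by rw [hlen2, hlen'], ?_⟩
    intro j hj0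
    rw [hget j hj0]
    by_cases hjm : j ∈ rest
    · have hji : j ≠ i := fun h => hni (h ▸ hjm)
      have hidx : (i :: rest).idxOf j = rest.idxOf j + 1 := by
        simp [Ne.symm hji]
      rw [if_pos hjm, if_pos (List.mem_cons_of_mem _ hjm), hidx]
      push_cast
      by_cases hc : start + 1 + (rest.idxOf j : Int) < r
      · rw [if_pos hc, if_pos (by omega)]
      · rw [if_neg hc, if_neg (by omega)]
    · rw [if_neg hjm, hbase', pvGetD_setD base _ 0 hi0 hilen hj0]
      by_cases hji : j = i
      · subst hji
        rw [if_pos rfl, if_pos (List.mem_cons_self ..), List.idxOf_cons_self]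
        norm_num
      · rw [if_neg hji, if_neg (by
          intro hm; rcases List.mem_cons.mp hm with h | h
          · exact hji h
          · exact hjm h)]

-- an enumerate-then-index fold is a zip fold
theorem pvFoldEnumZip (g : Int → (Option Int × Int) → Int → Int) :
    ∀ (l : List (Option Int × Int)) (strokes : List Int) (s : Int) (acc : Int), 0 ≤ s →
      s.toNat + l.length ≤ strokes.length →
      (PySem.List.enumerate l s).foldl (fun a q => g a q.2 (PySem.List.pyGetD strokes q.1 0)) acc
        = (l.zip (strokes.drop s.toNat)).foldl (fun a q => g a q.1 q.2) acc := by
  intro l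
  induction l with
  | nil => intro strokes s acc _ _; simp [PySem.List.enumerate]
  | cons x rest ih =>
    intro strokes s acc hs0 hlen
    rw [PySem.List.enumerate_cons, List.foldl_cons]
    have hsl : s.toNat < strokes.length := by simp at hlen; omega
    have hdrop : strokes.drop s.toNat = strokes[s.toNat] :: strokes.drop (s.toNat + 1) :=
      List.drop_eq_getElem_cons hsl
    have hgd : PySem.List.pyGetD strokes s 0 = strokes[s.toNat] :=
      PySem.List.pyGetD_eq_getElem _ 0 hs0 (by omega)
    rw [hdrop, List.zip_cons_cons, List.foldl_cons, hgd]
    have h1 : (s + 1).toNat = s.toNat + 1 := by omega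
    rw [ih strokes (s + 1) _ (by omega) (by simp at hlen ⊢; omega), h1]

theorem pvFoldSetLen (f : Int × Int → Int) : ∀ (l : List (Int × Int)) (base : List Int),
    (l.foldl (fun st p => PySem.List.pySetD st p.2 (f p)) base).length = base.length := by
  intro l
  induction l with
  | nil => intro base; rfl
  | cons p rest ih =>
    intro base
    rw [List.foldl_cons, ih, PySem.List.length_pySetD]

-- the two stroke-allocation strategies build the same list
theorem pvStrokes_eq (holes : List (Option Int)) (ch : Int) (hh : List Int)
    (hpre : 0 < ch → hh ≠ [] ∧ hh.length ≤ holes.length) :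
    pvWhileA (PySem.List.sorted (PySem.List.enumerate hh) (fun p => p.2) false)
      (List.replicate holes.length (0:Int)) ch
    = (if 0 < ch ∧ 0 < (hh.length : Int) then
        (PySem.List.enumerate ((PySem.List.sorted (PySem.List.enumerate hh) (fun p => p.2) false).map Prod.fst)).foldl
          (fun st p => PySem.List.pySetD st p.2
            (PySem.Int.floordiv ch (hh.length : Int) + if p.1 < PySem.Int.mod ch (hh.length : Int) then 1 else 0))
          (List.replicate holes.length (0:Int))
       else List.replicate holes.length (0:Int)) := by
  by_cases hch : 0 < ch
  case neg =>
    rw [if_neg (fun h => hch h.1), pvWhileA, dif_neg hch]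
  case pos =>
  obtain ⟨hhne, hhle⟩ := hpre hch
  set sortedH := PySem.List.sorted (PySem.List.enumerate hh) (fun p => p.2) false with hsorted
  set l := sortedH.map Prod.fst with hldef
  set base := List.replicate holes.length (0:Int) with hbase
  have hbl : base.length = holes.length := List.length_replicate
  have hperm : l.Perm ((PySem.List.enumerate hh).map Prod.fst) :=
    (PySem.List.sorted_perm ..).map Prod.fst
  have hlen : l.length = hh.length := by
    rw [hperm.length_eq, List.length_map, PySem.List.length_enumerate]
  have hne : l ≠ [] := by
    intro h; apply hhne
    have := hlen; rw [h] at this; simpa using this.symm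
  have hnd : l.Nodup := by
    refine hperm.nodup_iff.mpr ?_
    have hp : ((PySem.List.enumerate hh).map Prod.fst).Pairwise (· < ·) := by
      rw [List.pairwise_map]
      exact PySem.List.pairwise_lt_enumerate ..
    exact hp.imp ne_of_lt
  have hmem : ∀ i ∈ l, 0 ≤ i ∧ i < (base.length : Int) := by
    intro i hi
    have hi2 : i ∈ (PySem.List.enumerate hh).map Prod.fst := hperm.mem_iff.mp hi
    obtain ⟨p, hp, rfl⟩ := List.mem_map.mp hi2
    obtain ⟨k, hk, hpk⟩ := (PySem.List.mem_enumerate_iff _ _ _).mp hp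
    subst hpk
    rw [hbl]
    simp only [zero_add]
    exact ⟨by positivity, by omega⟩
  obtain ⟨hlenA, hgetA⟩ := pvWhileA_spec sortedH l hldef hne hnd ch base hmem
  rw [if_pos ⟨hch, by exact_mod_cast (List.length_pos_iff.mpr hhne)⟩]
  obtain ⟨hlenB, hgetB⟩ := pvFoldB_spec (PySem.Int.floordiv ch (hh.length : Int))
    (PySem.Int.mod ch (hh.length : Int)) l base 0 le_rfl hnd hmem
  have hn0 : (0:Int) < (hh.length : Int) := by exact_mod_cast List.length_pos_iff.mpr hhne
  apply List.ext_getElem (by rw [hlenA, hlenB])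
  intro k hk1 hk2
  have hkb : k < base.length := by rw [hlenA] at hk1; exact hk1
  have e1 : (pvWhileA sortedH base ch)[k] =
      PySem.List.pyGetD (pvWhileA sortedH base ch) (k : Int) 0 := by
    rw [PySem.List.pyGetD_eq_getElem _ 0 (by positivity) (by exact_mod_cast hk1)]
    simp
  have e2 : ((PySem.List.enumerate l).foldl
      (fun st p => PySem.List.pySetD st p.2
        (PySem.Int.floordiv ch (hh.length : Int) + if p.1 < PySem.Int.mod ch (hh.length : Int) then 1 else 0)) base)[k] =
      PySem.List.pyGetD ((PySem.List.enumerate l).foldl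
      (fun st p => PySem.List.pySetD st p.2
        (PySem.Int.floordiv ch (hh.length : Int) + if p.1 < PySem.Int.mod ch (hh.length : Int) then 1 else 0)) base) (k : Int) 0 := by
    rw [PySem.List.pyGetD_eq_getElem _ 0 (by positivity) (by exact_mod_cast hk2)]
    simp
  rw [e1, e2, hgetA (k : Int) (by positivity), hgetB (k : Int) (by positivity)]
  rw [pvGetD_replicate holes.length (by positivity : (0:Int) ≤ (k:Int))]
  rw [max_eq_left (by omega : (0:Int) ≤ ch), hlen]
  rw [PySem.Int.floordiv_eq_ediv_of_pos hn0, PySem.Int.mod_eq_emod_of_pos hn0]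
  by_cases hjm : (k : Int) ∈ l
  · rw [if_pos hjm, if_pos hjm, zero_add, zero_add]
  · simp [if_neg hjm]

-- ===== VERDICT (by name: the statement is the Claim_ definition above) =====
theorem calculate_adjusted_gross_score_spec : Claim_equal_calculate_adjusted_gross_score := by
  intro holes pars ch hh _ hpre
  unfold Spec_calculate_adjusted_gross_score
  unfold calculate_adjusted_gross_score calculate_adjusted_gross_score_alt
  simp only []
  rw [pvStrokes_eq holes ch hh hpre]
  set S := (if 0 < ch ∧ 0 < (hh.length : Int) then
        (PySem.List.enumerate ((PySem.List.sorted (PySem.List.enumerate hh) (fun p => p.2) false).map Prod.fst)).foldl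
          (fun st p => PySem.List.pySetD st p.2
            (PySem.Int.floordiv ch (hh.length : Int) + if p.1 < PySem.Int.mod ch (hh.length : Int) then 1 else 0))
          (List.replicate holes.length (0:Int))
       else List.replicate holes.length (0:Int)) with hS
  have hSlen : S.length = holes.length := by
    rw [hS]; split
    · exact (pvFoldSetLen _ _ _).trans List.length_replicate
    · exact List.length_replicate
  have hzip := pvFoldEnumZip
    (fun a pr v => a + min (match pr.1 with | none => pr.2 + 2 + v | some s => s) (pr.2 + 2 + v))
    (holes.zip pars) S 0 0 le_rfl
    (by rw [hSlen, Int.toNat_zero]; simp only [List.length_zip, zero_add]; omega)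
  rw [Int.toNat_zero, List.drop_zero] at hzip
  refine hzip.trans (List.foldl_ext _ _ 0 ?_)
  intro a q _
  rcases q with ⟨⟨sc, par⟩, st⟩
  cases sc
  · simp [min_self]
  · simp
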